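-- pv_equiv track=rewrite | github.com/rms095/touristic_tandem | tandem_app/utils.py | collect_counts
-- ===== SOURCE A (Python) =====
-- def collect_counts(collection, exclude):
--     counts = {}
--     for i in collection:
--         if i in exclude:
--             continue
--         if i in counts:
--             counts[i] += 1
--         else:
--             counts[i] = 1
--
--     return counts
-- ===== SOURCE B (Python) =====
-- def collect_counts(collection, exclude):
--     counts = {}
--     for i in collection:
--         counts[i] = counts.get(i, 0) + 1
--     for key in list(counts):
--         if key in exclude:
--             del counts[key]
--     return counts
-- ===== Notes on version B (the rewrite author's own statement) =====
-- stated objective: alternative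
-- what changed: B counts every element unconditionally into a dict in one pass, then removes the excluded keys in a separate deletion pass over the dict's keys, instead of A's single pass that tests exclusion before counting each element.
import Mathlib
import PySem

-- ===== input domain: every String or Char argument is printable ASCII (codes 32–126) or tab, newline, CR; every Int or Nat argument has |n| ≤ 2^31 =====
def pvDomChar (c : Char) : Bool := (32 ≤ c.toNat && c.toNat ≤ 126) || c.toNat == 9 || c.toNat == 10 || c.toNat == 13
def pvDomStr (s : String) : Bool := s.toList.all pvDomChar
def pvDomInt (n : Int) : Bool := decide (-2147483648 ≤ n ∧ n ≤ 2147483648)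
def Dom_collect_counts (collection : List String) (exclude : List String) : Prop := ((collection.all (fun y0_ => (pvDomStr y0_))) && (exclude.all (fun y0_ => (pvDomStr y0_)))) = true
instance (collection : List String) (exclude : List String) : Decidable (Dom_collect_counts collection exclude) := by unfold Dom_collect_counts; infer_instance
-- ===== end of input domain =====

-- B counts every element unconditionally in one pass, then deletes excluded keys in a
-- second pass over the dict's keys, instead of A's single pass that tests exclusion first.

-- ===== PORT A =====
-- for i in collection: if i in exclude: continue; if i in counts: counts[i] += 1 else counts[i] = 1
def collect_counts (collection : List String) (exclude : List String) : List (String × Int) :=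
  (collection.foldl
    (fun counts i =>
      if exclude.contains i then counts
      else match counts.get? i with
        | some v => counts.insert i (v + 1)
        | none   => counts.insert i 1)
    (PySem.Dict.empty : PySem.Dict String Int)).items

-- ===== PORT B =====
-- counts[i] = counts.get(i, 0) + 1 for all i; then for key in list(counts): if key in exclude: del counts[key]
def collect_counts_alt (collection : List String) (exclude : List String) : List (String × Int) :=
  let counts := collection.foldl
    (fun d i => d.insert i (d.getD i 0 + 1)) (PySem.Dict.empty : PySem.Dict String Int)
  (counts.keys.foldl
    (fun d key => if exclude.contains key then d.erase key else d) counts).items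

-- ===== PRECONDITION & SPEC =====
def Spec_collect_counts (collection : List String) (exclude : List String) (out : List (String × Int)) : Prop := out = collect_counts_alt collection exclude
instance (collection : List String) (exclude : List String) (out : List (String × Int)) : Decidable (Spec_collect_counts collection exclude out) := by unfold Spec_collect_counts; infer_instance

-- ===== CLAIM (what is proved, stated in full; the proofs are below) =====
def Claim_equal_collect_counts : Prop := ∀ (collection : List String) (exclude : List String), Dom_collect_counts collection exclude → Spec_collect_counts collection exclude (collect_counts collection exclude)

-- ===== LEMMAS AND PROOFS =====

-- A's loop body (both branches insert getD+1) is counting over the filtered list.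
theorem collect_counts_eq_counter_filter (collection exclude : List String) :
    collect_counts collection exclude =
      (PySem.Dict.counter (collection.filter (fun i => !exclude.contains i))).items := by
  unfold collect_counts
  congr 1
  have hbody : ∀ (counts : PySem.Dict String Int) (i : String),
      (if exclude.contains i then counts
       else match counts.get? i with
        | some v => counts.insert i (v + 1)
        | none   => counts.insert i 1) =
      (if !exclude.contains i then counts.insert i (counts.getD i 0 + 1) else counts) := by
    intro counts i
    cases h : exclude.contains i <;> simp
    cases hg : counts.get? i <;>
      simp [PySem.Dict.getD_eq_get?_getD, hg]
  calc collection.foldl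
        (fun counts i =>
          if exclude.contains i then counts
          else match counts.get? i with
            | some v => counts.insert i (v + 1)
            | none   => counts.insert i 1)
        (PySem.Dict.empty : PySem.Dict String Int)
      = collection.foldl
          (fun counts i => if !exclude.contains i then counts.insert i (counts.getD i 0 + 1) else counts)
          (PySem.Dict.empty : PySem.Dict String Int) := by
        exact PySem.List.foldl_congr_mem _ _ _ _ (fun d i _ => hbody d i)
    _ = (collection.filter (fun i => !exclude.contains i)).foldl
          (fun d i => d.insert i (d.getD i 0 + 1)) (PySem.Dict.empty : PySem.Dict String Int) := by
        exact PySem.List.foldl_if_eq_foldl_filter _ _ _ _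
    _ = PySem.Dict.counter (collection.filter (fun i => !exclude.contains i)) := by
        exact PySem.Dict.foldl_insert_getD_add_one_eq_counter _

-- The erase pass over a key list ks removes exactly the items whose key is in ks ∩ exclude.
theorem erase_pass_items (exclude : List String) :
    ∀ (ks : List String) (d : PySem.Dict String Int),
      (ks.foldl (fun d key => if exclude.contains key then d.erase key else d) d).items =
        d.items.filter (fun p => !(ks.contains p.1 && exclude.contains p.1)) := by
  intro ks
  induction ks with
  | nil => intro d; simp
  | cons k ks ih =>
    intro d
    simp only [List.foldl_cons]
    cases hk : exclude.contains k
    · rw [if_neg (by decide)]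
      rw [ih d]
      apply List.filter_congr
      intro p _
      have hkm : k ∉ exclude := by simpa using hk
      by_cases hpk : p.1 = k
      · simp [hpk, hkm]
      · simp [hpk]
    · rw [if_pos rfl]
      rw [ih (d.erase k)]
      have herase : (d.erase k).items = d.items.filter (fun p => !(p.1 == k)) := by
        simp [PySem.Dict.erase]
      rw [herase, List.filter_filter]
      apply List.filter_congr
      intro p _
      have hkm : k ∈ exclude := by simpa using hk
      by_cases hpk : p.1 = k
      · simp [hpk, hkm]
      · simp [hpk]

-- Counting the filtered list = counting everything then filtering the items by key.
theorem counter_filter_items (collection exclude : List String) :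
    (PySem.Dict.counter (collection.filter (fun i => !exclude.contains i))).items =
      (PySem.Dict.counter collection).items.filter (fun p => !exclude.contains p.1) := by
  rw [PySem.Dict.items_counter, PySem.Dict.items_counter, List.filter_map]
  have hset : PySem.Set.ofList (collection.filter (fun i => !exclude.contains i)) =
      (PySem.Set.ofList collection).filter (fun i => !exclude.contains i) := by
    induction collection with
    | nil => rfl
    | cons x xs ih =>
      by_cases hx : exclude.contains x = true
      · rw [List.filter_cons_of_neg (by simp only [hx]; decide), PySem.Set.ofList_cons, ih]
        unfold PySem.Set.discard
        rw [List.filter_cons_of_neg (by simp only [hx]; decide), List.filter_filter]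
        apply List.filter_congr; intro a _
        cases ha : (a == x)
        · simp
        · have hax : a = x := by simpa using ha
          have hxm : x ∈ exclude := by simpa using hx
          simp [hax, hxm]
      · have hx' : exclude.contains x = false := by simpa using hx
        rw [List.filter_cons_of_pos (by simp only [hx']; decide), PySem.Set.ofList_cons,
          PySem.Set.ofList_cons, List.filter_cons_of_pos (by simp only [hx']; decide), ih]
        unfold PySem.Set.discard
        rw [List.filter_filter, List.filter_filter]
        congr 1
        apply List.filter_congr; intro a _
        cases ha : (a == x) <;> simp [Bool.and_comm]
  rw [hset]
  simp only [Function.comp_def]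
  apply List.map_congr_left
  intro k hk
  simp only [List.mem_filter] at hk
  congr 1
  exact_mod_cast List.count_filter (p := fun i => !exclude.contains i) (a := k) (l := collection) hk.2

-- Every key of an item of d is in d.keys, so filtering by keys∩exclude = filtering by exclude.
theorem filter_keys_mem (d : PySem.Dict String Int) (exclude : List String) :
    d.items.filter (fun p => !(d.keys.contains p.1 && exclude.contains p.1)) =
      d.items.filter (fun p => !exclude.contains p.1) := by
  apply List.filter_congr
  intro p hp
  have : d.keys.contains p.1 = true := by
    simp [PySem.Dict.keys]
    exact ⟨p.2, hp⟩
  rw [this, Bool.true_and]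

-- ===== VERDICT (by name: the statement is the Claim_ definition above) =====
theorem collect_counts_spec : Claim_equal_collect_counts := by
  intro collection exclude _
  unfold Spec_collect_counts collect_counts_alt
  simp only
  rw [PySem.Dict.foldl_insert_getD_add_one_eq_counter,
    erase_pass_items, PySem.Dict.keys_counter]
  rw [collect_counts_eq_counter_filter, counter_filter_items]
  rw [← PySem.Dict.keys_counter (xs := collection)]
  exact (filter_keys_mem _ _).symm
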